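-- pv_equiv track=rewrite | github.com/pypi-data/pypi-mirror-64 | packages/pyven/pyven-30.tar.gz/pyven-30/pyven/execcheck.py | endswithifmain
-- ===== SOURCE A (Python) =====
-- def endswithifmain(istest, lines):
--     if ('    unittest.main()' if istest else '    main()') != lines[-1]:
--         return False
--     for i in range(len(lines) - 2, -1, -1):
--         if '''if '__main__' == __name__:''' == lines[i]:
--             return True
--         if not lines[i].startswith('    '):
--             return False
--     return False
-- ===== SOURCE B (Python) =====
-- def endswithifmain(istest, lines):
--     if ('    unittest.main()' if istest else '    main()') != lines[-1]:
--         return False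
--     result = False
--     for line in lines[:-1]:
--         if not line.startswith('    '):
--             result = (line == "if '__main__' == __name__:")
--     return result
-- ===== Notes on version B (the rewrite author's own statement) =====
-- stated objective: alternative
-- what changed: A scans backward over indices with early exit at the first non-indented line; B makes one forward pass over lines[:-1] with an accumulator that is reassigned (line == marker) at every non-indented line, relying on the marker never being indented.
import Mathlib
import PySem

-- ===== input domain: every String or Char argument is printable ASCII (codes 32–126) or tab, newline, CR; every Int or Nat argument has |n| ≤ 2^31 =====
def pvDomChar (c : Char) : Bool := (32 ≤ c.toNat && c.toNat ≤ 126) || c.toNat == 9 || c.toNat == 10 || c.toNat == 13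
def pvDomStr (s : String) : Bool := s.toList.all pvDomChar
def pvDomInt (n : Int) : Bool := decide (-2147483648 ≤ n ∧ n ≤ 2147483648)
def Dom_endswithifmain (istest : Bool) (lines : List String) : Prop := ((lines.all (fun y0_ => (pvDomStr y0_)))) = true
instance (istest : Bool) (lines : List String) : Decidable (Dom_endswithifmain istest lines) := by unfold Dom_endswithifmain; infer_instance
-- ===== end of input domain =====

-- B replaces A's backward early-exit index scan by a single forward fold over lines[:-1]
-- with an accumulator reassigned at each non-indented line (alternative decomposition, same cost).

-- ===== PORT A =====
-- the backward loop `for i in range(len(lines)-2, -1, -1)`; the `none` branch of pyGet?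
-- is unreachable (every generated index is in range)
def endswithifmainLoopA (lines : List String) : List Int → Bool
  | [] => false
  | i :: rest =>
    match PySem.List.pyGet? lines i with
    | none => false
    | some l =>
      if ("if '__main__' == __name__:" == l) then true
      else if ¬ (PySem.Str.startswith l "    ") then false
      else endswithifmainLoopA lines rest

def endswithifmain (istest : Bool) (lines : List String) : Bool :=
  match PySem.List.pyGet? lines (-1) with
  | none => false  -- Python raises IndexError here; excluded by Pre_
  | some last =>
    if (if istest then "    unittest.main()" else "    main()") ≠ last then false
    else endswithifmainLoopA lines (PySem.List.pyRange ((lines.length : Int) - 2) (-1) (-1))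

-- ===== PORT B =====
def endswithifmain_alt (istest : Bool) (lines : List String) : Bool :=
  match PySem.List.pyGet? lines (-1) with
  | none => false  -- Python raises IndexError here; excluded by Pre_
  | some last =>
    if (if istest then "    unittest.main()" else "    main()") ≠ last then false
    else
      (PySem.List.slice lines none (some (-1))).foldl
        (fun r line =>
          if ¬ PySem.Str.startswith line "    " then line == "if '__main__' == __name__:" else r)
        false

-- ===== PRECONDITION & SPEC =====
-- Pre_ excludes only the empty list, on which A (and B) raise IndexError at lines[-1].
def Pre_endswithifmain (istest : Bool) (lines : List String) : Prop := lines ≠ []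
instance (istest : Bool) (lines : List String) : Decidable (Pre_endswithifmain istest lines) := by unfold Pre_endswithifmain; infer_instance
def pvWitness_endswithifmain : Bool × List String := (false, ["if '__main__' == __name__:", "    main()"])

def Spec_endswithifmain (istest : Bool) (lines : List String) (out : Bool) : Prop := out = endswithifmain_alt istest lines
instance (istest : Bool) (lines : List String) (out : Bool) : Decidable (Spec_endswithifmain istest lines out) := by unfold Spec_endswithifmain; infer_instance

-- ===== CLAIM (what is proved, stated in full; the proofs are below) =====
def Claim_equal_endswithifmain : Prop := ∀ (istest : Bool) (lines : List String), Dom_endswithifmain istest lines → Pre_endswithifmain istest lines → Spec_endswithifmain istest lines (endswithifmain istest lines)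

-- ===== LEMMAS AND PROOFS =====

-- A's backward scan, expressed structurally on the (reversed) list of scanned lines
def scanBack : List String → Bool
  | [] => false
  | l :: rest =>
    if ("if '__main__' == __name__:" == l) then true
    else if ¬ (PySem.Str.startswith l "    ") then false
    else scanBack rest

theorem loopA_eq_scanBack (lines : List String) :
    ∀ k : Nat, k < lines.length →
      endswithifmainLoopA lines (PySem.List.pyRange (k : Int) (-1) (-1))
        = scanBack ((lines.take (k + 1)).reverse) := by
  intro k
  induction k with
  | zero =>
    intro hk
    rw [PySem.List.pyRange_neg_one_cons (by omega), PySem.List.pyRange_neg_one_eq_nil (by omega)]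
    rw [List.take_add_one, List.getElem?_eq_getElem hk]
    simp only [endswithifmainLoopA, PySem.List.pyGet?_natCast, List.getElem?_eq_getElem hk,
      Option.toList_some, List.reverse_append, List.reverse_cons, List.reverse_nil,
      List.nil_append, List.cons_append, scanBack, List.take_zero, List.reverse_nil]
  | succ k ih =>
    intro hk
    rw [PySem.List.pyRange_neg_one_cons (by omega)]
    rw [List.take_add_one, List.getElem?_eq_getElem hk]
    have h1 : ((k + 1 : Nat) : Int) - 1 = (k : Int) := by omega
    simp only [endswithifmainLoopA, h1, PySem.List.pyGet?_natCast,
      List.getElem?_eq_getElem hk, Option.toList_some, List.reverse_append,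
      List.reverse_cons, List.reverse_nil, List.nil_append, List.cons_append, scanBack]
    rw [ih (by omega)]

theorem marker_not_indented :
    PySem.Chars.startswith "if '__main__' == __name__:".toList [' ', ' ', ' ', ' '] = false := by
  decide

theorem foldl_eq_scanBack (xs : List String) :
    xs.foldl
      (fun r line =>
        if ¬ PySem.Str.startswith line "    " then line == "if '__main__' == __name__:" else r)
      false
      = scanBack xs.reverse := by
  induction xs using List.reverseRecOn with
  | nil => rfl
  | append_singleton ys l ih =>
    rw [List.foldl_append, List.foldl_cons, List.foldl_nil, List.reverse_append]
    simp only [List.reverse_cons, List.reverse_nil, List.nil_append, List.cons_append]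
    rw [show scanBack (l :: ys.reverse)
        = (if ("if '__main__' == __name__:" == l) then true
           else if ¬ PySem.Str.startswith l "    " then false
           else scanBack ys.reverse) from rfl]
    by_cases hsw : PySem.Chars.startswith l.toList [' ', ' ', ' ', ' '] = true
    · have hne : ¬ ("if '__main__' == __name__:" == l) = true := by
        intro h
        have hl : "if '__main__' == __name__:" = l := beq_iff_eq.mp h
        rw [← hl, marker_not_indented] at hsw
        exact Bool.false_ne_true hsw
      rw [if_neg hne, if_neg (by simp [hsw]), if_neg (by simp [hsw])]
      exact ih
    · have hsw' : PySem.Chars.startswith l.toList [' ', ' ', ' ', ' '] = false :=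
        Bool.not_eq_true _ |>.mp hsw
      rw [if_pos (by simp [hsw'])]
      by_cases he : l = "if '__main__' == __name__:"
      · subst he
        simp
      · rw [if_neg (by simp [Ne.symm he]), if_pos (by simp [hsw'])]
        simp [he]

-- ===== VERDICT (by name: the statement is the Claim_ definition above) =====
theorem endswithifmain_spec : Claim_equal_endswithifmain := by
  intro istest lines _ hpre
  unfold Spec_endswithifmain endswithifmain endswithifmain_alt
  match h : PySem.List.pyGet? lines (-1) with
  | none => rfl
  | some last =>
    by_cases hguard : (if istest then "    unittest.main()" else "    main()") ≠ last
    · simp [hguard]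
    · simp only [hguard, if_false, if_neg hguard]
      rw [PySem.List.slice_to_neg_one, foldl_eq_scanBack]
      rcases Nat.lt_or_ge lines.length 2 with h2 | h2
      · -- length = 1: empty range and empty dropLast
        have hlen : lines.length = 1 := by
          have : lines ≠ [] := hpre
          have : 0 < lines.length := List.length_pos_iff.mpr this
          omega
        have : (lines.length : Int) - 2 = -1 := by rw [hlen]; rfl
        rw [this, PySem.List.pyRange_neg_one_eq_nil (by omega)]
        have : lines.dropLast = [] := by
          rw [List.dropLast_eq_take, hlen]; simp
        rw [this]
        rfl
      · have hc : (lines.length : Int) - 2 = ((lines.length - 2 : Nat) : Int) := by omega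
        rw [hc, loopA_eq_scanBack lines (lines.length - 2) (by omega),
          List.dropLast_eq_take]
        have : lines.length - 2 + 1 = lines.length - 1 := by omega
        rw [this]
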